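-- pv_equiv track=rewrite | github.com/Mltechdrawer/BIO | docs/Bloque1_Bioinformatica/olc_assembly.py | consensus_from_layout
-- ===== SOURCE A (Python) =====
-- def overlap(a, b, min_length=3):
--     """
--     Longitud del solapamiento máximo entre el final de 'a' y el inicio de 'b'.
--     """
--     start = 0
--     while True:
--         start = a.find(b[:min_length], start)
--         if start == -1:
--             return 0
--         if b.startswith(a[start:]):
--             return len(a) - start
--         start += 1
--
-- def consensus_from_layout(order, k=3):
--     """
--     Genera consenso concatenando lecturas según solapamiento estimado.
--     (Versión simple: usa el solapamiento máximo local entre consecutivas).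
--     """
--     if not order:
--         return ""
--     consensus = order[0]
--     for i in range(1, len(order)):
--         a, b = consensus, order[i]
--         # buscar mejor solapamiento entre 'consensus' y 'b'
--         maxo = overlap(a, b, min_length=k)
--         consensus = a + b[maxo:]
--     return consensus
-- ===== SOURCE B (Python) =====
-- def consensus_from_layout(order, k=3):
--     """Consensus by maximal suffix-prefix overlap, found in one descending scan of candidate lengths."""
--     if not order:
--         return ""
--     consensus = order[0]
--     for read in order[1:]:
--         lo = len(read[:k])  # the probe read[:k] must fit inside the overlap
--         best = 0
--         for L in range(min(len(consensus), len(read)), 0, -1):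
--             if L >= lo and consensus.endswith(read[:L]):
--                 best = L
--                 break
--         consensus += read[best:]
--     return consensus
-- ===== Notes on version B (the rewrite author's own statement) =====
-- stated objective: faster
-- what changed: The overlap search no longer re-runs str.find/startswith over the whole growing consensus from successive start positions; B scans candidate overlap lengths once, descending from min(len(consensus), len(read)), and takes the first length at least len(read[:k]) whose read-prefix is a suffix of the consensus (endswith).
import Mathlib
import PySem

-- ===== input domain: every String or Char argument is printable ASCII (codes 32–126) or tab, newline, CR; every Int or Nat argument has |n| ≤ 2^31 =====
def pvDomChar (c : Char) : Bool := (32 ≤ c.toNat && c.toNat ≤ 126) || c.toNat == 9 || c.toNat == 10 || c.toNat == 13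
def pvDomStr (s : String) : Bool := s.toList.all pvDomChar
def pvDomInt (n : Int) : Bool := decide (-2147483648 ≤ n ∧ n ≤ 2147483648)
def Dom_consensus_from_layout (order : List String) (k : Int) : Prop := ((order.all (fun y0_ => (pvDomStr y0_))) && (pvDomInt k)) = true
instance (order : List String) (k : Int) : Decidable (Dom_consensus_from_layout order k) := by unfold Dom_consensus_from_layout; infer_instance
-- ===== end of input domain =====

-- B replaces A's repeated find/startswith overlap search by a single descending endswith scan over candidate overlap lengths.

-- ===== PORT A =====
-- A's `while True` loop over `start`; fuel = a.length + 1 - start bounds the iterations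
-- (start grows by at least 1 each pass and the loop always returns once start reaches len(a)).
def overlapGo (a b p : List Char) : Nat → Nat → Int
  | 0, _ => 0   -- never reached: fuel is chosen ≥ remaining iterations
  | fuel+1, start =>
    let s := PySem.Chars.findFrom a p (start : Int) none   -- start = a.find(b[:min_length], start)
    if s = -1 then 0
    else if PySem.Chars.startswith b (a.drop s.toNat) then (a.length : Int) - s
    else overlapGo a b p fuel (s.toNat + 1)

def overlapA (a b : List Char) (min_length : Int) : Int :=
  overlapGo a b (PySem.Chars.slice b none (some min_length)) (a.length + 1) 0

def consensus_from_layout (order : List String) (k : Int) : String :=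
  match order with
  | [] => ""
  | h :: t =>
    String.ofList (t.foldl (fun cons r =>
      let b := r.toList
      let maxo := overlapA cons b k
      cons ++ PySem.Chars.slice b (some maxo) none) h.toList)

-- ===== PORT B =====
-- lo = len(read[:k])
def lolen (b : List Char) (k : Int) : Nat := (PySem.Chars.slice b none (some k)).length

-- for L in range(min(len(consensus), len(read)), 0, -1): if L >= lo and consensus.endswith(read[:L]): best = L; break
def scanB (a b : List Char) (lo : Nat) : Nat → Nat
  | 0 => 0
  | c+1 => if lo ≤ c+1 ∧ PySem.Chars.endswith a (b.take (c+1)) = true then c+1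
           else scanB a b lo c

def bestOverlap (a b : List Char) (k : Int) : Nat :=
  scanB a b (lolen b k) (min a.length b.length)

def consensus_from_layout_alt (order : List String) (k : Int) : String :=
  match order with
  | [] => ""
  | h :: t =>
    String.ofList (t.foldl (fun cons r =>
      let b := r.toList
      cons ++ b.drop (bestOverlap cons b k)) h.toList)

-- ===== PRECONDITION & SPEC =====
def Spec_consensus_from_layout (order : List String) (k : Int) (out : String) : Prop := out = consensus_from_layout_alt order k
instance (order : List String) (k : Int) (out : String) : Decidable (Spec_consensus_from_layout order k out) := by unfold Spec_consensus_from_layout; infer_instance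

-- ===== CLAIM (what is proved, stated in full; the proofs are below) =====
def Claim_equal_consensus_from_layout : Prop := ∀ (order : List String) (k : Int), Dom_consensus_from_layout order k → Spec_consensus_from_layout order k (consensus_from_layout order k)

-- ===== LEMMAS AND PROOFS =====

-- len(b[:k]) expressed arithmetically
def mGuard (b : List Char) (k : Int) : Nat :=
  if 0 ≤ k then min k.toNat b.length else (b.length + k).toNat

-- the candidate predicate both loops search over: L is a feasible overlap length
def pvQ (a b : List Char) (m L : Nat) : Bool :=
  decide (m ≤ L ∧ L ≤ b.length) && PySem.Chars.endswith a (b.take L)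

-- generic descending scan: largest L ≤ c with P L, else 0
def dscan (P : Nat → Bool) : Nat → Nat
  | 0 => 0
  | c+1 => if P (c+1) then c+1 else dscan P c

lemma dscan_eq_of_false (P : Nat → Bool) :
    ∀ c c', c' ≤ c → (∀ L, c' < L → L ≤ c → P L = false) → dscan P c = dscan P c' := by
  intro c
  induction c with
  | zero => intro c' h _; obtain rfl := Nat.eq_zero_of_le_zero h; rfl
  | succ c ih =>
    intro c' hle hF
    rcases Nat.eq_or_lt_of_le hle with h | h
    · rw [h]
    · have hc' : c' ≤ c := by omega
      have : P (c+1) = false := hF _ (by omega) (le_refl _)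
      simp [dscan, this]
      exact ih c' hc' (fun L h1 h2 => hF L h1 (by omega))

lemma dscan_eq_zero (P : Nat → Bool) (c : Nat)
    (h : ∀ L, 0 < L → L ≤ c → P L = false) : dscan P c = 0 := by
  rw [dscan_eq_of_false P c 0 (Nat.zero_le _) (fun L h1 h2 => h L h1 h2)]; rfl

lemma slice_to_eq_take (b : List Char) (k : Int) :
    PySem.Chars.slice b none (some k) = b.take (mGuard b k) := by
  simp [PySem.List.slice, PySem.List.clampIdx, mGuard]
  split_ifs <;> omega

lemma mGuard_le (b : List Char) (k : Int) : mGuard b k ≤ b.length := by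
  unfold mGuard; split_ifs <;> omega

lemma lolen_eq (b : List Char) (k : Int) : lolen b k = mGuard b k := by
  unfold lolen
  rw [slice_to_eq_take, List.length_take, min_eq_left (mGuard_le b k)]

lemma slice_from_nat (b : List Char) (n : Nat) :
    PySem.Chars.slice b (some ((n : Nat) : Int)) none = b.drop n := by
  have h0 : ¬ ((n : Int) < 0) := by omega
  simp [PySem.List.slice, PySem.List.clampIdx, h0]
  rcases le_or_gt n b.length with h | h
  · rw [min_eq_left h, List.take_of_length_le (by simp)]
  · rw [min_eq_right (by omega)]
    simp [List.drop_eq_nil_of_le (le_of_lt h)]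

lemma pvQ_iff_startswith (a b : List Char) (m s : Nat) (hs : s ≤ a.length) :
    pvQ a b m (a.length - s) = true ↔
      (m ≤ a.length - s ∧ a.length - s ≤ b.length ∧
        PySem.Chars.startswith b (a.drop s) = true) := by
  unfold pvQ
  simp only [Bool.and_eq_true, decide_eq_true_eq, PySem.Chars.endswith_iff,
    PySem.Chars.startswith_iff]
  constructor
  · rintro ⟨⟨h1, h2⟩, h3⟩
    refine ⟨h1, h2, ?_⟩
    rw [List.suffix_iff_eq_drop] at h3
    rw [List.prefix_iff_eq_take]
    rw [List.length_take, min_eq_left h2] at h3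
    have : a.length - (a.length - s) = s := by omega
    rw [this] at h3
    rw [List.length_drop, ← h3]
  · rintro ⟨h1, h2, h3⟩
    refine ⟨⟨h1, h2⟩, ?_⟩
    rw [List.prefix_iff_eq_take, List.length_drop] at h3
    rw [List.suffix_iff_eq_drop, List.length_take, min_eq_left h2]
    have : a.length - (a.length - s) = s := by omega
    rw [this, ← h3]

lemma pvQ_prefix (a b : List Char) (m L : Nat) (hL : pvQ a b m L = true) :
    b.take m <+: a.drop (a.length - L) := by
  unfold pvQ at hL
  simp only [Bool.and_eq_true, decide_eq_true_eq, PySem.Chars.endswith_iff] at hL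
  obtain ⟨⟨h1, h2⟩, h3⟩ := hL
  rw [List.suffix_iff_eq_drop, List.length_take, min_eq_left h2] at h3
  rw [← h3]
  have : b.take m = (b.take L).take m := by rw [List.take_take, min_eq_left h1]
  rw [this]
  exact List.take_prefix _ _

-- prefix of a later drop is infix of the earlier drop
lemma prefix_drop_infix (p l : List Char) (i j : Nat) (hij : j ≤ i)
    (h : p <+: l.drop i) : p <:+: l.drop j := by
  have : l.drop i = (l.drop j).drop (i - j) := by rw [List.drop_drop]; congr 1; omega
  rw [this] at h
  exact h.isInfix.trans (List.drop_suffix _ _).isInfix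

-- ===== A-side characterisation =====
lemma goEq (a b : List Char) (m : Nat) (hm : m ≤ b.length) :
    ∀ fuel start, start ≤ a.length → a.length + 1 - start ≤ fuel →
      overlapGo a b (b.take m) fuel start = Int.ofNat (dscan (pvQ a b m) (a.length - start)) := by
  intro fuel
  induction fuel with
  | zero => intro start h1 h2; omega
  | succ fuel ih =>
    intro start h1 h2
    have hlen : (b.take m).length = m := by rw [List.length_take]; omega
    have hFF := PySem.Chars.findFrom_natCast a (b.take m) start h1
    by_cases hfind : PySem.Chars.find (a.drop start) (b.take m) = -1
    · -- no further occurrence: A returns 0; every candidate fails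
      have hFF1 : PySem.Chars.findFrom a (b.take m) (start : Int) none = -1 := by
        rw [hFF, if_pos hfind]
      have hno : ¬ (b.take m) <:+: a.drop start := by
        rw [← PySem.Chars.find_eq_neg_one_iff]; exact hfind
      have hz : dscan (pvQ a b m) (a.length - start) = 0 := by
        apply dscan_eq_zero
        intro L hL0 hLc
        by_contra hQ
        rw [Bool.not_eq_false] at hQ
        have hpref := pvQ_prefix a b m L hQ
        exact hno (prefix_drop_infix _ _ _ _ (by omega) hpref)
      simp only [overlapGo, hFF1, reduceIte, hz]
      rfl
    · -- find returns s = start + j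
      have hj0 : 0 ≤ PySem.Chars.find (a.drop start) (b.take m) := by
        have := PySem.Chars.neg_one_le_find (a.drop start) (b.take m)
        omega
      have hjlen : PySem.Chars.find (a.drop start) (b.take m) ≤ (a.drop start).length :=
        PySem.Chars.find_le_length _ _
      rw [List.length_drop] at hjlen
      have hFF2 : PySem.Chars.findFrom a (b.take m) (start : Int) none =
          (start : Int) + PySem.Chars.find (a.drop start) (b.take m) := by
        rw [hFF, if_neg hfind]
      set f : Int := (start : Int) + PySem.Chars.find (a.drop start) (b.take m) with hf
      have hfne : f ≠ -1 := by omega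
      have hspec := PySem.Chars.findFrom_natCast_spec a (b.take m) start h1
      rw [hFF2] at hspec
      obtain ⟨hge, hocc, hmin⟩ := hspec hfne
      have hsn : f.toNat ≤ a.length := by omega
      have hsge : start ≤ f.toNat := by omega
      have hmL : m ≤ a.length - f.toNat := by
        have := hocc.length_le
        rw [List.length_drop, hlen] at this; omega
      by_cases hsw : PySem.Chars.startswith b (a.drop f.toNat) = true
      · -- success: result = len(a) - s, and pvQ (len a - s) holds
        have hLb : a.length - f.toNat ≤ b.length := by
          have h' := ((PySem.Chars.startswith_iff _ _).mp hsw).length_le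
          rw [List.length_drop] at h'; omega
        have hQ : pvQ a b m (a.length - f.toNat) = true :=
          (pvQ_iff_startswith a b m f.toNat hsn).mpr ⟨hmL, hLb, hsw⟩
        have hstep : dscan (pvQ a b m) (a.length - start) = dscan (pvQ a b m) (a.length - f.toNat) := by
          apply dscan_eq_of_false _ _ _ (by omega)
          intro L hgt hle
          by_contra hQ'
          rw [Bool.not_eq_false] at hQ'
          have hpref := pvQ_prefix a b m L hQ'
          exact hmin (a.length - L) (by omega) (by omega) hpref
        have hval : dscan (pvQ a b m) (a.length - f.toNat) = a.length - f.toNat := by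
          rcases Nat.eq_zero_or_pos (a.length - f.toNat) with h0 | hpos
          · rw [h0]; rfl
          · obtain ⟨c, hc⟩ := Nat.exists_eq_succ_of_ne_zero (by omega : a.length - f.toNat ≠ 0)
            rw [hc] at hQ ⊢
            simp [dscan, hQ]
        simp only [overlapGo, hFF2]
        rw [if_neg hfne, if_pos hsw, hstep, hval]
        clear_value f
        rw [Int.ofNat_eq_natCast]
        omega
      · -- failure: candidate len(a) - s fails; continue from s+1
        have hslt : f.toNat < a.length := by
          by_contra hcon
          have heq : f.toNat = a.length := by omega
          rw [heq, List.drop_length] at hsw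
          exact hsw ((PySem.Chars.startswith_iff _ _).mpr List.nil_prefix)
        have hQfalse : pvQ a b m (a.length - f.toNat) = false := by
          by_contra hQ'
          rw [Bool.not_eq_false] at hQ'
          obtain ⟨_, _, h3⟩ := (pvQ_iff_startswith a b m f.toNat hsn).mp hQ'
          exact hsw h3
        have hstep : dscan (pvQ a b m) (a.length - start) = dscan (pvQ a b m) (a.length - (f.toNat + 1)) := by
          apply dscan_eq_of_false _ _ _ (by omega)
          intro L hgt hle
          rcases Nat.lt_or_ge L (a.length - f.toNat) with h | h
          · omega
          rcases Nat.eq_or_lt_of_le h with h | h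
          · rw [← h]; exact hQfalse
          · by_contra hQ'
            rw [Bool.not_eq_false] at hQ'
            have hpref := pvQ_prefix a b m L hQ'
            exact absurd hpref (hmin (a.length - L) (by omega) (by omega))
        simp only [overlapGo, hFF2]
        rw [if_neg hfne, if_neg hsw, ih (f.toNat + 1) (by omega) (by omega), hstep]

-- ===== B-side characterisation =====
lemma scanBEq (a b : List Char) (m : Nat) :
    ∀ c, c ≤ min a.length b.length →
      scanB a b m c = dscan (pvQ a b m) c := by
  intro c
  induction c with
  | zero => intro _; rfl
  | succ c ih =>
    intro hc
    have hbl : c + 1 ≤ b.length := by omega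
    have hQ : pvQ a b m (c+1) =
        (decide (m ≤ c+1) && PySem.Chars.endswith a (b.take (c+1))) := by
      unfold pvQ
      congr 1
      simp only [decide_eq_decide]
      constructor
      · exact fun h => h.1
      · exact fun h => ⟨h, hbl⟩
    simp only [scanB, dscan, hQ]
    by_cases hcond : m ≤ c+1 ∧ PySem.Chars.endswith a (b.take (c+1)) = true
    · rw [if_pos hcond]
      have : (decide (m ≤ c+1) && PySem.Chars.endswith a (b.take (c+1))) = true := by
        simp [hcond.1, hcond.2]
      rw [this, if_pos rfl]
    · rw [if_neg hcond]
      have : (decide (m ≤ c+1) && PySem.Chars.endswith a (b.take (c+1))) = false := by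
        rcases not_and_or.mp hcond with h | h
        · simp [h]
        · rw [Bool.not_eq_true] at h; simp [h]
      rw [this]
      simp only [Bool.false_eq_true, if_false]
      exact ih (by omega)

-- ===== per-merge equality =====
lemma overlapA_eq (a b : List Char) (k : Int) :
    overlapA a b k = Int.ofNat (bestOverlap a b k) := by
  unfold overlapA bestOverlap
  rw [lolen_eq, slice_to_eq_take]
  rw [goEq a b (mGuard b k) (mGuard_le b k) (a.length + 1) 0 (Nat.zero_le _) (by omega)]
  rw [scanBEq a b (mGuard b k) (min a.length b.length) (le_refl _)]
  congr 1
  rw [Nat.sub_zero]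
  apply dscan_eq_of_false _ _ _ (by omega)
  intro L hgt hle
  unfold pvQ
  simp only [Bool.and_eq_false_iff]
  left
  simp only [decide_eq_false_iff_not, not_and]
  intro h; omega

lemma step_eq (k : Int) (cons : List Char) (r : String) :
    cons ++ PySem.Chars.slice r.toList (some (overlapA cons r.toList k)) none =
      cons ++ r.toList.drop (bestOverlap cons r.toList k) := by
  rw [overlapA_eq]
  congr 1
  exact slice_from_nat r.toList (bestOverlap cons r.toList k)

-- ===== VERDICT (by name: the statement is the Claim_ definition above) =====
theorem consensus_from_layout_spec : Claim_equal_consensus_from_layout := by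
  intro order k _
  unfold Spec_consensus_from_layout consensus_from_layout consensus_from_layout_alt
  cases order with
  | nil => rfl
  | cons h t =>
    have hf : (fun (cons : List Char) (r : String) =>
        let b := r.toList
        let maxo := overlapA cons b k
        cons ++ PySem.Chars.slice b (some maxo) none) =
      (fun (cons : List Char) (r : String) =>
        let b := r.toList
        cons ++ b.drop (bestOverlap cons b k)) := by
      funext cons r; exact step_eq k cons r
    simp only [hf]
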